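-- pv_equiv track=rewrite | github.com/nawhgnawg/Algo | Programmers/L2_ex11.py | solution
-- ===== SOURCE A (Python) =====
-- from collections import defaultdict
--
-- def compare(a, b):
--     for key, val in a.items():
--         if key not in b or val != b[key]:
--             return 0
--     return 1
--
-- def solution(want, number, discount):
--     want_dict = {key: val for key, val in zip(want, number)}
--     sale_dict = defaultdict(int)
--
--     answer = 0
--     length = len(discount)
--     for i in range(length):
--         sale_dict[discount[i]] += 1
--         if i >= 10:
--             sale_dict[discount[i - 10]] = max(0, sale_dict[discount[i - 10]] - 1)
--         if i >= 9:
--             answer += compare(want_dict, sale_dict)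
--
--     return answer
-- ===== SOURCE B (Python) =====
-- def _bump(req, cnt, good, k, d):
--     """Apply delta d to the window count of item k; return the updated
--     number of satisfied requirements (cnt is updated in place)."""
--     v = req.get(k)
--     if v is None:
--         return good
--     old = cnt.get(k)
--     new = max(0, (0 if old is None else old) + d)
--     cnt[k] = new
--     return good + (new == v) - (old == v)
--
--
-- def solution(want, number, discount):
--     req = dict(zip(want, number))
--     target = len(req)
--     cnt = {}
--     good = 0
--     answer = 0
--     for i, item in enumerate(discount):
--         good = _bump(req, cnt, good, item, 1)
--         if i >= 10:
--             good = _bump(req, cnt, good, discount[i - 10], -1)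
--         if i >= 9 and good == target:
--             answer += 1
--     return answer
-- ===== Notes on version B (the rewrite author's own statement) =====
-- stated objective: alternative
-- what changed: Replaces the per-index full dict comparison (compare re-scans every requirement for each window) with a single sliding-window pass that maintains a running count of currently satisfied requirements, updated incrementally as items enter and leave the window.
import Mathlib
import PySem

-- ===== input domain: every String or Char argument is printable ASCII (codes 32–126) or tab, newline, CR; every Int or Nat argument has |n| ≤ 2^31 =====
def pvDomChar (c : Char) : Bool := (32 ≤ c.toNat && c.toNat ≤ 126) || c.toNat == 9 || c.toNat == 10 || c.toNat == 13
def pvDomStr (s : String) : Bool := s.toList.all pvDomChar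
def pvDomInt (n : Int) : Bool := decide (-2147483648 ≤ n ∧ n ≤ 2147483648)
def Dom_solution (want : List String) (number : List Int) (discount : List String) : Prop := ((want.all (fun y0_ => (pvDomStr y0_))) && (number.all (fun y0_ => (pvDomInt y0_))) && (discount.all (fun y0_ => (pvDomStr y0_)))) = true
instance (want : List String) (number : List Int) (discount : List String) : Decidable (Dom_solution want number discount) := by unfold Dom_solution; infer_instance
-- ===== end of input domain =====

-- B replaces A's per-index full requirement re-scan by one sliding-window pass that keeps an
-- incremental count of satisfied requirements (objective: alternative algorithm, same result).


-- ===== PORT A =====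
-- Python's `compare(a, b)`, iterating a.items(): first failing key returns 0, else 1.
def pvCompareGo (b : PySem.Dict String Int) : List (String × Int) → Int
  | [] => 1
  | (k, v) :: rest =>
      if b.contains k = false ∨ v ≠ b.getD k 0 then 0 else pvCompareGo b rest

def pvCompare (a b : PySem.Dict String Int) : Int := pvCompareGo b a.items

-- loop body of A: one iteration of `for i in range(length)`
def pvStepA (want_dict : PySem.Dict String Int) (discount : List String)
    (st : PySem.Dict String Int × Int) (i : Int) : PySem.Dict String Int × Int :=
  let d := PySem.List.pyGetD discount i ""
  let sale := st.1.insert d (st.1.getD d 0 + 1)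
  let sale := if 10 ≤ i then
      let g := PySem.List.pyGetD discount (i - 10) ""
      sale.insert g (max 0 (sale.getD g 0 - 1))
    else sale
  let answer := if 9 ≤ i then st.2 + pvCompare want_dict sale else st.2
  (sale, answer)

def solution (want : List String) (number : List Int) (discount : List String) : Int :=
  let want_dict := (want.zip number).foldl (fun d p => d.insert p.1 p.2) PySem.Dict.empty
  let length : Int := discount.length
  ((PySem.List.pyRange 0 length 1).foldl (pvStepA want_dict discount)
    (PySem.Dict.empty, 0)).2

-- ===== PORT B =====
-- Python's `_bump`: applies delta d to the window count of k, returns (cnt, good) updated.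
def pvBump (req cnt : PySem.Dict String Int) (good : Int) (k : String) (d : Int) :
    PySem.Dict String Int × Int :=
  match req.get? k with
  | none => (cnt, good)
  | some v =>
      let old := cnt.get? k
      let nw := max 0 (old.getD 0 + d)
      (cnt.insert k nw,
       good + (if nw = v then 1 else 0) - (if old = some v then 1 else 0))

-- loop body of B: one iteration of `for i, item in enumerate(discount)`
def pvStepB (req : PySem.Dict String Int) (target : Int) (discount : List String)
    (st : PySem.Dict String Int × Int × Int) (p : Int × String) :
    PySem.Dict String Int × Int × Int :=
  let cg := pvBump req st.1 st.2.1 p.2 1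
  let cg := if 10 ≤ p.1 then
      pvBump req cg.1 cg.2 (PySem.List.pyGetD discount (p.1 - 10) "") (-1)
    else cg
  let answer := if 9 ≤ p.1 ∧ cg.2 = target then st.2.2 + 1 else st.2.2
  (cg.1, cg.2, answer)

def solution_alt (want : List String) (number : List Int) (discount : List String) : Int :=
  let req := (want.zip number).foldl (fun d p => d.insert p.1 p.2) PySem.Dict.empty
  let target : Int := req.size
  ((PySem.List.enumerate discount).foldl (pvStepB req target discount)
    (PySem.Dict.empty, 0, 0)).2.2

-- ===== PRECONDITION & SPEC =====
def Spec_solution (want : List String) (number : List Int) (discount : List String) (out : Int) : Prop := out = solution_alt want number discount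
instance (want : List String) (number : List Int) (discount : List String) (out : Int) : Decidable (Spec_solution want number discount out) := by unfold Spec_solution; infer_instance

-- ===== CLAIM (what is proved, stated in full; the proofs are below) =====
def Claim_equal_solution : Prop := ∀ (want : List String) (number : List Int) (discount : List String), Dom_solution want number discount → Spec_solution want number discount (solution want number discount)

-- ===== LEMMAS AND PROOFS =====

-- the coupling invariant between A's state (sale, answer) and B's state (cnt, good, answer):
-- sale and cnt agree on the requirement keys, cnt's values are nonnegative, good counts the
-- currently satisfied requirements, the answers agree.
def pvInv (req : PySem.Dict String Int)
    (a : PySem.Dict String Int × Int)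
    (b : PySem.Dict String Int × Int × Int) : Prop :=
  (∀ k, req.contains k = true → a.1.get? k = b.1.get? k) ∧
  (∀ k w, b.1.get? k = some w → 0 ≤ w) ∧
  b.2.1 = (req.items.countP (fun p => b.1.get? p.1 == some p.2) : Int) ∧
  a.2 = b.2.2

lemma pvCompareGo_eq (b : PySem.Dict String Int) (items : List (String × Int)) :
    pvCompareGo b items = if ∀ p ∈ items, b.get? p.1 = some p.2 then 1 else 0 := by
  induction items with
  | nil => simp [pvCompareGo]
  | cons hd tl ih =>
    obtain ⟨k, v⟩ := hd
    rw [pvCompareGo, ih]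
    rw [PySem.Dict.contains_eq_isSome_get?, PySem.Dict.getD_eq_get?_getD]
    rcases h : b.get? k with _ | w
    · simp [h]
    · by_cases hv : v = w
      · subst hv
        have hiff : (∀ p ∈ (k, v) :: tl, b.get? p.1 = some p.2)
            ↔ (∀ p ∈ tl, b.get? p.1 = some p.2) := by
          constructor
          · intro hh p hp; exact hh p (List.mem_cons_of_mem _ hp)
          · intro hh p hp
            rcases List.mem_cons.mp hp with rfl | hp'
            · exact h
            · exact hh p hp'
        simp only [hiff]
        simp
      · simp [hv, h, Ne.symm hv]

-- inserting at a requirement key changes the satisfied count by exactly the bump delta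
lemma pv_sat_insert (req : PySem.Dict String Int) (hnd : req.keys.Nodup)
    (cnt : PySem.Dict String Int) (k : String) (w v : Int)
    (hk : req.get? k = some v) :
    (req.items.countP (fun p => (cnt.insert k w).get? p.1 == some p.2) : Int)
      = (req.items.countP (fun p => cnt.get? p.1 == some p.2) : Int)
        + (if w = v then 1 else 0) - (if cnt.get? k = some v then 1 else 0) := by
  have hmem : (k, v) ∈ req.items := PySem.Dict.mem_items_of_get?_eq_some _ hk
  obtain ⟨l1, l2, hsplit⟩ := List.append_of_mem hmem
  have hkeys : req.keys = l1.map Prod.fst ++ k :: l2.map Prod.fst := by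
    simp [PySem.Dict.keys, hsplit]
  rw [hkeys] at hnd
  have hk1 : k ∉ l1.map Prod.fst := by
    intro hc
    exact (List.nodup_append.mp hnd).2.2 k hc k (List.mem_cons_self) rfl
  have hk2 : k ∉ l2.map Prod.fst := by
    have := (List.nodup_append.mp hnd).2.1
    exact (List.nodup_cons.mp this).1
  have congr1 : ∀ (l : List (String × Int)), k ∉ l.map Prod.fst →
      l.countP (fun p => (cnt.insert k w).get? p.1 == some p.2)
        = l.countP (fun p => cnt.get? p.1 == some p.2) := by
    intro l hl
    apply List.countP_congr
    intro p hp
    have hne : p.1 ≠ k := fun hc => hl (hc ▸ List.mem_map_of_mem hp)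
    rw [PySem.Dict.get?_insert_of_ne _ _ hne]
  rw [hsplit, List.countP_append, List.countP_append, List.countP_cons, List.countP_cons,
    congr1 l1 hk1, congr1 l2 hk2, PySem.Dict.get?_insert_self]
  push_cast
  by_cases h1 : w = v <;> by_cases h2 : cnt.get? k = some v <;>
    simp [h1, h2] <;> omega

-- pvBump preserves the state part of the invariant against A's corresponding insert
-- (aval is A's inserted value; on requirement keys it equals the clamped bump value)
lemma pv_bump_inv (req : PySem.Dict String Int) (hnd : req.keys.Nodup)
    (sale cnt : PySem.Dict String Int) (good : Int) (k : String) (d aval : Int)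
    (h1 : ∀ k', req.contains k' = true → sale.get? k' = cnt.get? k')
    (h2 : ∀ k' w, cnt.get? k' = some w → 0 ≤ w)
    (hg : good = (req.items.countP (fun p => cnt.get? p.1 == some p.2) : Int))
    (hval : req.contains k = true → aval = max 0 (cnt.getD k 0 + d)) :
    (∀ k', req.contains k' = true →
        (sale.insert k aval).get? k' = (pvBump req cnt good k d).1.get? k') ∧
    (∀ k' w, (pvBump req cnt good k d).1.get? k' = some w → 0 ≤ w) ∧
    (pvBump req cnt good k d).2
      = (req.items.countP (fun p => (pvBump req cnt good k d).1.get? p.1 == some p.2) : Int) := by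
  rcases hreq : req.get? k with _ | v
  · have hck : req.contains k = false := by
      rw [PySem.Dict.contains_eq_isSome_get?, hreq]; rfl
    refine ⟨?_, ?_, ?_⟩ <;> simp only [pvBump, hreq]
    · intro k' hk'
      have hne : k' ≠ k := fun hc => by rw [hc, hck] at hk'; cases hk'
      rw [PySem.Dict.get?_insert_of_ne _ _ hne, h1 k' hk']
    · exact h2
    · exact hg
  · have hck : req.contains k = true := by
      rw [PySem.Dict.contains_eq_isSome_get?, hreq]; rfl
    have hvala : aval = max 0 (cnt.getD k 0 + d) := hval hck
    have hnw : max 0 ((cnt.get? k).getD 0 + d) = aval := by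
      rw [hvala, PySem.Dict.getD_eq_get?_getD]
    refine ⟨?_, ?_, ?_⟩ <;> simp only [pvBump, hreq]
    · intro k' hk'
      by_cases he : k' = k
      · subst he
        rw [PySem.Dict.get?_insert_self, PySem.Dict.get?_insert_self, hnw]
      · rw [PySem.Dict.get?_insert_of_ne _ _ he, PySem.Dict.get?_insert_of_ne _ _ he,
          h1 k' hk']
    · intro k' w hw
      by_cases he : k' = k
      · subst he
        rw [PySem.Dict.get?_insert_self] at hw
        cases hw
        exact le_max_left _ _
      · rw [PySem.Dict.get?_insert_of_ne _ _ he] at hw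
        exact h2 k' w hw
    · rw [pv_sat_insert req hnd cnt k _ v hreq, hg]

-- the compare of A reads exactly "all requirements satisfied", i.e. good = size
lemma pv_compare_eq (req sale cnt : PySem.Dict String Int) (good : Int)
    (h1 : ∀ k, req.contains k = true → sale.get? k = cnt.get? k)
    (hg : good = (req.items.countP (fun p => cnt.get? p.1 == some p.2) : Int)) :
    pvCompare req sale = if good = (req.size : Int) then 1 else 0 := by
  rw [pvCompare, pvCompareGo_eq]
  have hiff : (∀ p ∈ req.items, sale.get? p.1 = some p.2)
      ↔ (∀ p ∈ req.items, (cnt.get? p.1 == some p.2) = true) := by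
    constructor <;> intro hh p hp <;>
      have hc : req.contains p.1 = true :=
        (PySem.Dict.contains_iff_mem_keys _ _).mpr (PySem.Dict.mem_keys_of_mem_items _ hp)
    · rw [beq_iff_eq, ← h1 p.1 hc]; exact hh p hp
    · rw [h1 p.1 hc, ← beq_iff_eq]; exact hh p hp
  have hlen : (req.size : Int) = (req.items.length : Int) := by rfl
  rw [hlen, hg]
  by_cases hall : ∀ p ∈ req.items, sale.get? p.1 = some p.2
  · rw [if_pos hall, if_pos]
    have := List.countP_eq_length.mpr (hiff.mp hall)
    exact_mod_cast this
  · rw [if_neg hall, if_neg]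
    intro hc
    have : req.items.countP (fun p => cnt.get? p.1 == some p.2) = req.items.length := by
      exact_mod_cast hc
    exact hall (hiff.mpr (List.countP_eq_length.mp this))

lemma pv_main (req : PySem.Dict String Int) (hnd : req.keys.Nodup) (discount : List String)
    (m : Nat) :
    pvInv req
      ((PySem.List.pyRange 0 (m : Int) 1).foldl (pvStepA req discount) (PySem.Dict.empty, 0))
      ((PySem.List.pyRange 0 (m : Int) 1).foldl
        (fun st i => pvStepB req (req.size : Int) discount st (i, PySem.List.pyGetD discount i ""))
        (PySem.Dict.empty, 0, 0)) := by
  induction m with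
  | zero =>
    rw [Nat.cast_zero, PySem.List.pyRange_one_eq_nil le_rfl]
    exact ⟨fun k _ => rfl, fun k w h => by simp [PySem.Dict.get?_empty] at h,
      by simp [PySem.Dict.get?_empty], rfl⟩
  | succ n ih =>
    have hcast : ((n + 1 : Nat) : Int) = (n : Int) + 1 := by push_cast; ring
    rw [hcast, PySem.List.pyRange_one_succ_right (by positivity), List.foldl_append,
      List.foldl_append]
    obtain ⟨ih1, ih2, ih3, ih4⟩ := ih
    set stA := (PySem.List.pyRange 0 (n : Int) 1).foldl (pvStepA req discount)
      (PySem.Dict.empty, 0) with hstA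
    set stB := (PySem.List.pyRange 0 (n : Int) 1).foldl
      (fun st i => pvStepB req (req.size : Int) discount st (i, PySem.List.pyGetD discount i ""))
      (PySem.Dict.empty, 0, 0) with hstB
    simp only [List.foldl_cons, List.foldl_nil]
    -- phase 1: item discount[i] enters the window
    have hd0 : ∀ k', req.contains k' = true →
        stA.1.getD k' 0 = stB.1.getD k' 0 := by
      intro k' hk'
      rw [PySem.Dict.getD_eq_get?_getD, PySem.Dict.getD_eq_get?_getD, ih1 k' hk']
    have hnn : ∀ k', 0 ≤ stB.1.getD k' 0 := by
      intro k'
      rw [PySem.Dict.getD_eq_get?_getD]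
      rcases h : stB.1.get? k' with _ | w
      · simp
      · simpa using ih2 k' w h
    set k1 := PySem.List.pyGetD discount (n : Int) "" with hk1
    have inv1 := pv_bump_inv req hnd stA.1 stB.1 stB.2.1 k1 1
      (stA.1.getD k1 0 + 1) ih1 ih2 ih3
      (by
        intro hc
        rw [hd0 k1 hc]
        have := hnn k1
        omega)
    set cg1 := pvBump req stB.1 stB.2.1 k1 1 with hcg1
    obtain ⟨j1, j2, j3⟩ := inv1
    -- phase 2: item discount[i-10] leaves the window (when 10 ≤ i)
    by_cases h10 : 10 ≤ (n : Int)
    case pos =>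
      set sale1 := stA.1.insert k1 (stA.1.getD k1 0 + 1) with hsale1
      have hd1 : ∀ k', req.contains k' = true →
          sale1.getD k' 0 = cg1.1.getD k' 0 := by
        intro k' hk'
        rw [PySem.Dict.getD_eq_get?_getD, PySem.Dict.getD_eq_get?_getD, j1 k' hk']
      set k2 := PySem.List.pyGetD discount ((n : Int) - 10) "" with hk2'
      have inv2 := pv_bump_inv req hnd sale1 cg1.1 cg1.2 k2 (-1)
        (max 0 (sale1.getD k2 0 - 1)) j1
        (fun k' w h => by
          by_cases he : k' = k1
          · subst he
            rw [hcg1] at h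
            exact (pv_bump_inv req hnd stA.1 stB.1 stB.2.1 k1 1
              (stA.1.getD k1 0 + 1) ih1 ih2 ih3 (by
                intro hc
                rw [hd0 k1 hc]
                have := hnn k1
                omega)).2.1 k1 w h
          · exact (pv_bump_inv req hnd stA.1 stB.1 stB.2.1 k1 1
              (stA.1.getD k1 0 + 1) ih1 ih2 ih3 (by
                intro hc
                rw [hd0 k1 hc]
                have := hnn k1
                omega)).2.1 k' w h)
        j3
        (by
          intro hc
          rw [hd1 k2 hc]
          ring_nf)
      obtain ⟨m1, m2, m3⟩ := inv2
      refine ⟨?_, ?_, ?_, ?_⟩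
      · intro k' hk'
        simp only [pvStepA, pvStepB, if_pos h10]
        exact m1 k' hk'
      · intro k' w h
        simp only [pvStepB, if_pos h10] at h
        exact m2 k' w h
      · simp only [pvStepB, if_pos h10]
        exact m3
      · simp only [pvStepA, pvStepB, if_pos h10]
        by_cases h9 : 9 ≤ (n : Int)
        · rw [if_pos h9]
          rw [pv_compare_eq req _ _ _ m1 m3, ih4]
          by_cases hgt : (pvBump req cg1.1 cg1.2 k2 (-1)).2 = (req.size : Int)
          · rw [if_pos hgt, if_pos ⟨h9, hgt⟩]
          · rw [if_neg hgt, if_neg (by rintro ⟨_, hc⟩; exact hgt hc), add_zero]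
        · rw [if_neg h9, if_neg (by rintro ⟨hc, _⟩; exact h9 hc), ih4]
    case neg =>
      refine ⟨?_, ?_, ?_, ?_⟩
      · intro k' hk'
        simp only [pvStepA, pvStepB, if_neg h10]
        exact j1 k' hk'
      · intro k' w h
        simp only [pvStepB, if_neg h10] at h
        exact j2 k' w h
      · simp only [pvStepB, if_neg h10]
        exact j3
      · simp only [pvStepA, pvStepB, if_neg h10]
        by_cases h9 : 9 ≤ (n : Int)
        · rw [if_pos h9]
          rw [pv_compare_eq req _ _ _ j1 j3, ih4]
          by_cases hgt : cg1.2 = (req.size : Int)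
          · rw [if_pos hgt, if_pos ⟨h9, hgt⟩]
          · rw [if_neg hgt, if_neg (by rintro ⟨_, hc⟩; exact hgt hc), add_zero]
        · rw [if_neg h9, if_neg (by rintro ⟨hc, _⟩; exact h9 hc), ih4]

-- ===== VERDICT (by name: the statement is the Claim_ definition above) =====
theorem solution_spec : Claim_equal_solution := by
  intro want number discount _
  simp only [Spec_solution, solution, solution_alt]
  set req := (want.zip number).foldl (fun d p => d.insert p.1 p.2) PySem.Dict.empty with hreq
  have hnd : req.keys.Nodup :=
    PySem.Dict.nodup_keys_foldl_insert_key _ Prod.fst (fun _ p => p.2) _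
      PySem.Dict.nodup_keys_empty
  rw [PySem.List.enumerate_eq_map_pyRange discount "", List.foldl_map]
  have hlen : PySem.List.len discount = (discount.length : Int) := by
    simp [PySem.List.len]
  rw [hlen]
  exact (pv_main req hnd discount discount.length).2.2.2
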